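-- pv_equiv track=rewrite | github.com/fuchslukas00/daily-media-briefing | script_v1.py | balance_items_by_source
-- ===== SOURCE A (Python) =====
-- def balance_items_by_source(items: list[dict], per_source: int = 8, total: int = 60) -> list[dict]:
--     """
--     Keep a balanced set of items: cap per source, then cap total.
--     Assumes items are already sorted by recency (newest first).
--     """
--     out = []
--     counts = {}
--     for it in items:
--         src = it.get("source") or "unknown"
--         if counts.get(src, 0) >= per_source:
--             continue
--         out.append(it)
--         counts[src] = counts.get(src, 0) + 1
--         if len(out) >= total:
--             break
--     return out
-- ===== SOURCE B (Python) =====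
-- def balance_items_by_source(items: list[dict], per_source: int = 8, total: int = 60) -> list[dict]:
--     """Index-based selection: group item indices by source, keep each source's first
--     max(per_source, 0) indices, sort the kept indices back into recency order, rebuild,
--     and apply the total cap."""
--     by_src = {}
--     for i, it in enumerate(items):
--         src = it.get("source") or "unknown"
--         by_src[src] = by_src.get(src, []) + [i]
--     keep = sorted(i for idxs in by_src.values() for i in idxs[:max(per_source, 0)])
--     return [items[i] for i in keep[:total]]
-- ===== Notes on version B (the rewrite author's own statement) =====
-- stated objective: alternative
-- what changed: Replaces A's single counting pass (counts dict, append, early break) by an index-based group-by: build per-source lists of item indices, keep each source's first per_source indices, sort the kept indices to restore order, rebuild the list and slice to total.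
-- intended difference: When total = 0 while the item list is nonempty and per_source >= 1, A returns one item (its break is checked only after appending) while B returns no items, which is the intended meaning of a total cap of 0. — e.g. on balance_items_by_source([[("source", "a")]], 1, 0): A returns [[("source", "a")]], B returns []
-- outside the precondition, e.g. on balance_items_by_source([{'source': 'a'}], 8, -1): A returns [{'source': 'a'}], B returns []
import Mathlib
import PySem

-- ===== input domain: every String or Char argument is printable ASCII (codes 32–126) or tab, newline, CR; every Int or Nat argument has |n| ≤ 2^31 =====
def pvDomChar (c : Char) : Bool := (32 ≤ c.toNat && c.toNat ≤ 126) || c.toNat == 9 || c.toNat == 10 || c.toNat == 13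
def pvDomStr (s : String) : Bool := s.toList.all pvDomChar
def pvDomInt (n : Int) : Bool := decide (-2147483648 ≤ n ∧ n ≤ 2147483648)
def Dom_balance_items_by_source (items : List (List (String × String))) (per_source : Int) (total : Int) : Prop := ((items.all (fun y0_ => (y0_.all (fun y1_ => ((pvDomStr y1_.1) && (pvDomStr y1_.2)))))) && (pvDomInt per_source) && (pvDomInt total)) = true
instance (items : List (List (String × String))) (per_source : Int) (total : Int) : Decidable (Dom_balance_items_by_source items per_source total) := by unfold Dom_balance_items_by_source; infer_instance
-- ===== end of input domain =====

-- B replaces A's single counting pass (counts dict, append, early break) by index-based selection: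
-- group item indices by source, keep each source's first per_source indices, sort the kept indices,
-- rebuild, slice to total; on total = 0 with items to keep, A returns one item and B (intended) none.

-- shared helper: src = it.get("source") or "unknown"  (the same Python line in A and B)
def srcOf (it : List (String × String)) : String :=
  match (PySem.Dict.ofList it).get? "source" with
  | some s => if s = "" then "unknown" else s
  | none => "unknown"

-- ===== PORT A =====
-- A's single loop: skip a saturated source, append, count, break once the total cap is reached
def goA (ps total : Int) : List (List (String × String)) → PySem.Dict String Int → List (List (String × String)) → List (List (String × String))
  | [], _, out => out
  | it :: rest, counts, out =>
    let src := srcOf it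
    if ps ≤ counts.getD src 0 then goA ps total rest counts out
    else
      let out' := out ++ [it]
      let counts' := counts.insert src (counts.getD src 0 + 1)
      if total ≤ (out'.length : Int) then out' else goA ps total rest counts' out'

def balance_items_by_source (items : List (List (String × String))) (per_source : Int) (total : Int) : List (List (String × String)) :=
  goA per_source total items PySem.Dict.empty []

-- ===== PORT B =====
-- B: by_src groups indices by source; keep = sorted kept indices; rebuild and slice to total
def balance_items_by_source_alt (items : List (List (String × String))) (per_source : Int) (total : Int) : List (List (String × String)) :=
  let by_src : PySem.Dict String (List Int) :=
    (PySem.List.enumerate items).foldl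
      (fun d p => d.modify (srcOf p.2) [] (fun v => v ++ [p.1])) PySem.Dict.empty
  let keep : List Int :=
    PySem.List.sorted
      (by_src.values.flatMap (fun idxs => PySem.List.slice idxs none (some (max per_source 0))))
      (fun x => x) false
  (PySem.List.slice keep none (some total)).map (fun i => PySem.List.pyGetD items i [])

-- ===== PRECONDITION & SPEC =====
-- Pre_ excludes negative total (not a meaningful cap: A's early break still returns one item there,
-- while B's Python slice keep[:total] drops items from the end — neither value is specified).
def Pre_balance_items_by_source (items : List (List (String × String))) (per_source : Int) (total : Int) : Prop := 0 ≤ total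
instance (items : List (List (String × String))) (per_source : Int) (total : Int) : Decidable (Pre_balance_items_by_source items per_source total) := by unfold Pre_balance_items_by_source; infer_instance
def pvWitness_balance_items_by_source : (List (List (String × String))) × Int × Int := ([[("source", "a")], [("source", "b")]], 8, 60)

-- When total = 0 with a nonempty item list and per_source ≥ 1, A returns one item (its break is
-- checked only after appending) while B returns no items, the intended meaning of a total cap of 0.
def D_balance_items_by_source (items : List (List (String × String))) (per_source : Int) (total : Int) : Prop := items ≠ [] ∧ 1 ≤ per_source ∧ total = 0
instance (items : List (List (String × String))) (per_source : Int) (total : Int) : Decidable (D_balance_items_by_source items per_source total) := by unfold D_balance_items_by_source; infer_instance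

def Spec_balance_items_by_source (items : List (List (String × String))) (per_source : Int) (total : Int) (out : List (List (String × String))) : Prop := ¬ D_balance_items_by_source items per_source total → out = balance_items_by_source_alt items per_source total
instance (items : List (List (String × String))) (per_source : Int) (total : Int) (out : List (List (String × String))) : Decidable (Spec_balance_items_by_source items per_source total out) := by unfold Spec_balance_items_by_source; infer_instance

def pvDiffWitness_balance_items_by_source : (List (List (String × String))) × Int × Int := ([[("source", "a")]], 1, 0)
def pvDiffWitnessOut_balance_items_by_source : (List (List (String × String))) × (List (List (String × String))) := ([[("source", "a")]], [])

-- ===== CLAIM (what is proved, stated in full; the proofs are below) =====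
def Claim_unchanged_balance_items_by_source : Prop := ∀ (items : List (List (String × String))) (per_source : Int) (total : Int), Dom_balance_items_by_source items per_source total → Pre_balance_items_by_source items per_source total → Spec_balance_items_by_source items per_source total (balance_items_by_source items per_source total)
def Claim_changed_balance_items_by_source : Prop := Dom_balance_items_by_source (pvDiffWitness_balance_items_by_source.1) (pvDiffWitness_balance_items_by_source.2.1) (pvDiffWitness_balance_items_by_source.2.2) ∧ Pre_balance_items_by_source (pvDiffWitness_balance_items_by_source.1) (pvDiffWitness_balance_items_by_source.2.1) (pvDiffWitness_balance_items_by_source.2.2) ∧ D_balance_items_by_source (pvDiffWitness_balance_items_by_source.1) (pvDiffWitness_balance_items_by_source.2.1) (pvDiffWitness_balance_items_by_source.2.2) ∧ balance_items_by_source (pvDiffWitness_balance_items_by_source.1) (pvDiffWitness_balance_items_by_source.2.1) (pvDiffWitness_balance_items_by_source.2.2) = pvDiffWitnessOut_balance_items_by_source.1 ∧ balance_items_by_source_alt (pvDiffWitness_balance_items_by_source.1) (pvDiffWitness_balance_items_by_source.2.1) (pvDiffWitness_balance_items_by_source.2.2) = pvDiffWitnessOut_balance_items_by_source.2 ∧ pvDiffWitnessOut_balance_items_by_source.1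 ≠ pvDiffWitnessOut_balance_items_by_source.2
def Claim_exact_balance_items_by_source : Prop := ∀ (items : List (List (String × String))) (per_source : Int) (total : Int), Dom_balance_items_by_source items per_source total → Pre_balance_items_by_source items per_source total → D_balance_items_by_source items per_source total → balance_items_by_source items per_source total ≠ balance_items_by_source_alt items per_source total

-- ===== LEMMAS AND PROOFS =====

-- count of items with a given source
def cntS (pre : List (List (String × String))) (s : String) : Nat := pre.countP (fun it => srcOf it == s)

-- reference: the (increasing) absolute indices of the items the per-source filter keeps
def refIdx (ps : Int) : List (List (String × String)) → List (List (String × String)) → List Int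
  | _, [] => []
  | pre, it :: rest =>
    if (cntS pre (srcOf it) : Int) < ps then (pre.length : Int) :: refIdx ps (pre ++ [it]) rest
    else refIdx ps (pre ++ [it]) rest

-- A's loop without the break (its pure per-source filter)
def filtB (ps : Int) : List (List (String × String)) → PySem.Dict String Int → List (List (String × String))
  | [], _ => []
  | it :: rest, counts =>
    let src := srcOf it
    if counts.getD src 0 < ps then it :: filtB ps rest (counts.insert src (counts.getD src 0 + 1))
    else filtB ps rest counts

-- the (source, index) pairs B's grouping loop consumes, and the per-source index groups
def pairsOf (items : List (List (String × String))) : List (String × Int) :=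
  (PySem.List.enumerate items).map (fun p => (srcOf p.2, p.1))
def grp (items : List (List (String × String))) (s : String) : List Int :=
  ((pairsOf items).filter (fun q => q.1 == s)).map (·.2)

lemma goA_eq_take (ps total : Int) : ∀ (items : List (List (String × String))) (counts : PySem.Dict String Int) (out : List (List (String × String))),
    (out.length : Int) < total →
    goA ps total items counts out = out ++ (filtB ps items counts).take (total - out.length).toNat := by
  intro items
  induction items with
  | nil => intro counts out _; simp [goA, filtB]
  | cons it rest ih =>
    intro counts out hlt
    simp only [goA, filtB]
    by_cases h : ps ≤ counts.getD (srcOf it) 0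
    · simp only [h, if_pos, if_neg (not_lt.mpr h)]
      exact ih counts out hlt
    · simp only [h, if_pos (not_le.mp h)]
      have htn : (total - (out.length : Int)).toNat = ((total - ((out.length : Int) + 1)).toNat) + 1 := by omega
      rw [htn, List.take_succ_cons]
      by_cases hb : total ≤ ((out ++ [it]).length : Int)
      · simp only [hb, if_pos]
        have : total = (out.length : Int) + 1 := by simp at hb; omega
        have : (total - ((out.length : Int) + 1)).toNat = 0 := by omega
        simp [this]
      · simp only [hb, if_neg, not_false_iff]
        rw [ih _ (out ++ [it]) (by simpa using hb)]
        simp [List.append_assoc]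

lemma goA_skip_all (ps total : Int) (hps : ps ≤ 0) : ∀ (items : List (List (String × String))) (counts : PySem.Dict String Int) (out : List (List (String × String))),
    (∀ k, 0 ≤ counts.getD k 0) → goA ps total items counts out = out := by
  intro items
  induction items with
  | nil => intro counts out _; simp [goA]
  | cons it rest ih =>
    intro counts out h0
    simp only [goA]
    have : ps ≤ counts.getD (srcOf it) 0 := le_trans hps (h0 _)
    simp only [this, if_pos]
    exact ih counts out h0

-- enumerate from the right
lemma enumerate_append_singleton {α : Type} (xs : List α) (y : α) (s : Int) :
    PySem.List.enumerate (xs ++ [y]) s = PySem.List.enumerate xs s ++ [((s + xs.length : Int), y)] := by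
  induction xs generalizing s with
  | nil => simp [PySem.List.enumerate_nil, PySem.List.enumerate_cons]
  | cons x t ih =>
    simp only [List.cons_append, PySem.List.enumerate_cons, ih (s+1), List.length_cons]
    push_cast; ring_nf

lemma pairsOf_append (items : List (List (String × String))) (it : List (String × String)) :
    pairsOf (items ++ [it]) = pairsOf items ++ [(srcOf it, (items.length : Int))] := by
  simp [pairsOf, enumerate_append_singleton]

lemma grp_append (items : List (List (String × String))) (it : List (String × String)) (s : String) :
    grp (items ++ [it]) s = grp items s ++ (if srcOf it == s then [(items.length : Int)] else []) := by
  by_cases h : srcOf it == s <;> simp [grp, pairsOf_append, List.filter_append, h]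

lemma length_grp (items : List (List (String × String))) (s : String) :
    (grp items s).length = cntS items s := by
  induction items using List.reverseRecOn with
  | nil => simp [grp, pairsOf, cntS, PySem.List.enumerate_nil]
  | append_singleton init it ih =>
    by_cases h : srcOf it == s <;>
      simp [grp_append, cntS, List.countP_append, h] at * <;> omega

lemma grp_of_not_mem (items : List (List (String × String))) (s : String)
    (h : s ∉ items.map srcOf) : grp items s = [] := by
  have hc : cntS items s = 0 := by
    rw [cntS, List.countP_eq_zero]
    intro it hit hbeq
    exact h (List.mem_map.mpr ⟨it, hit, by simpa using hbeq⟩)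
  have := length_grp items s
  rw [hc] at this
  exact List.eq_nil_of_length_eq_zero this

-- refIdx from the right
lemma refIdx_append (ps : Int) : ∀ (rest : List (List (String × String))) (pre : List (List (String × String))) (it : List (String × String)),
    refIdx ps pre (rest ++ [it]) = refIdx ps pre rest ++
      (if (cntS (pre ++ rest) (srcOf it) : Int) < ps then [((pre ++ rest).length : Int)] else []) := by
  intro rest
  induction rest with
  | nil => intro pre it; simp [refIdx]
  | cons r rs ih =>
    intro pre it
    simp only [List.cons_append, refIdx]
    by_cases h : (cntS pre (srcOf r) : Int) < ps <;>
      simp only [h, if_pos, if_neg, not_false_iff] <;>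
      rw [ih (pre ++ [r]) it] <;> simp [List.append_assoc]

lemma refIdx_lb (ps : Int) : ∀ (rest pre : List (List (String × String))),
    ∀ x ∈ refIdx ps pre rest, (pre.length : Int) ≤ x := by
  intro rest
  induction rest with
  | nil => intro pre x hx; simp [refIdx] at hx
  | cons it rs ih =>
    intro pre x hx
    simp only [refIdx] at hx
    split at hx
    · rcases List.mem_cons.mp hx with rfl | hx
      · exact le_refl _
      · have := ih (pre ++ [it]) x hx; simp at this; omega
    · have := ih (pre ++ [it]) x hx; simp at this; omega

lemma refIdx_pairwise (ps : Int) : ∀ (rest pre : List (List (String × String))),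
    (refIdx ps pre rest).Pairwise (· < ·) := by
  intro rest
  induction rest with
  | nil => intro pre; simp [refIdx]
  | cons it rs ih =>
    intro pre
    simp only [refIdx]
    split
    · refine List.Pairwise.cons ?_ (ih (pre ++ [it]))
      intro x hx
      have := refIdx_lb ps rs (pre ++ [it]) x hx
      simp at this; omega
    · exact ih (pre ++ [it])

lemma cntS_append_singleton (pre : List (List (String × String))) (it : List (String × String)) (s : String) :
    cntS (pre ++ [it]) s = cntS pre s + (if srcOf it == s then 1 else 0) := by
  simp [cntS, List.countP_append, List.countP_cons]

-- the invariant bridge: A's filter loop computes the items at the reference indices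
lemma filtB_eq_map_refIdx (ps : Int) : ∀ (rest pre : List (List (String × String))) (counts : PySem.Dict String Int),
    (∀ s, counts.getD s 0 = min (cntS pre s : Int) (max ps 0)) →
    filtB ps rest counts = (refIdx ps pre rest).map (fun i => PySem.List.pyGetD (pre ++ rest) i []) := by
  intro rest
  induction rest with
  | nil => intro pre counts _; simp [filtB, refIdx]
  | cons it rs ih =>
    intro pre counts hinv
    simp only [filtB, refIdx]
    have hc0 : counts.getD (srcOf it) 0 = min (cntS pre (srcOf it) : Int) (max ps 0) := hinv _
    have hcond : (counts.getD (srcOf it) 0 < ps) ↔ ((cntS pre (srcOf it) : Int) < ps) := by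
      rw [hc0]; omega
    by_cases h : (cntS pre (srcOf it) : Int) < ps
    · rw [if_pos (hcond.mpr h), if_pos h]
      have hhead : PySem.List.pyGetD (pre ++ it :: rs) ((pre.length : Nat) : Int) [] = it := by
        rw [PySem.List.pyGetD_natCast]
        simp [List.getD]
      have hinv' : ∀ s, (counts.insert (srcOf it) (counts.getD (srcOf it) 0 + 1)).getD s 0
          = min (cntS (pre ++ [it]) s : Int) (max ps 0) := by
        intro s
        rw [PySem.Dict.getD_insert, cntS_append_singleton]
        by_cases hs : s = srcOf it
        · have hb : (srcOf it == s) = true := by simp [hs]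
          rw [if_pos hs, hb, hc0, hs]
          simp only [if_true]
          push_cast
          omega
        · have hb : (srcOf it == s) = false := by
            simp only [beq_eq_false_iff_ne, ne_eq]; exact fun hh => hs hh.symm
          rw [if_neg hs, hb, hinv s]
          simp
      rw [List.map_cons, hhead, ih (pre ++ [it]) _ hinv']
      simp [List.append_assoc]
    · rw [if_neg (fun hh => h (hcond.mp hh)), if_neg h]
      have hinv' : ∀ s, counts.getD s 0 = min (cntS (pre ++ [it]) s : Int) (max ps 0) := by
        intro s
        rw [cntS_append_singleton]
        by_cases hs : s = srcOf it
        · have hb : (srcOf it == s) = true := by simp [hs]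
          rw [hb, hinv s, hs]
          simp only [if_true]
          push_cast
          omega
        · have hb : (srcOf it == s) = false := by
            simp only [beq_eq_false_iff_ne, ne_eq]; exact fun hh => hs hh.symm
          rw [hb, hinv s]
          simp
      rw [ih (pre ++ [it]) _ hinv']
      simp [List.append_assoc]

-- B's grouping dict: value at s is grp items s, keys are the distinct sources
lemma by_src_getD (items : List (List (String × String))) (s : String) :
    ((PySem.List.enumerate items).foldl
      (fun d p => d.modify (srcOf p.2) [] (fun v => v ++ [p.1])) PySem.Dict.empty).getD s [] = grp items s := by
  have hfold : (PySem.List.enumerate items).foldl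
      (fun d p => d.modify (srcOf p.2) [] (fun v => v ++ [p.1])) PySem.Dict.empty
      = (pairsOf items).foldl (fun d q => d.modify q.1 [] (fun v => v ++ [q.2])) PySem.Dict.empty := by
    rw [pairsOf, List.foldl_map]
  rw [hfold, PySem.Dict.getD_foldl_modify_append, PySem.Dict.getD_empty, grp]
  simp

lemma by_src_keys (items : List (List (String × String))) :
    ((PySem.List.enumerate items).foldl
      (fun d p => d.modify (srcOf p.2) [] (fun v => v ++ [p.1])) PySem.Dict.empty).keys
      = PySem.Set.ofList (items.map srcOf) := by
  rw [PySem.Dict.keys_foldl_modify_key, PySem.Dict.keys_empty, PySem.Set.update_nil_left]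
  have : (PySem.List.enumerate items).map (fun p => srcOf p.2)
      = ((PySem.List.enumerate items).map (·.2)).map srcOf := by rw [List.map_map]; rfl
  rw [this, PySem.List.map_snd_enumerate]

-- the flattened kept-index multiset is a permutation of the reference index list
lemma flat_perm_refIdx (ps : Int) (items : List (List (String × String))) :
    ((PySem.Set.ofList (items.map srcOf)).flatMap
        (fun s => (grp items s).take (max ps 0).toNat)).Perm (refIdx ps [] items) := by
  induction items using List.reverseRecOn with
  | nil => simp [refIdx]
  | append_singleton init it ih =>
    have hsrcs : (init ++ [it]).map srcOf = init.map srcOf ++ [srcOf it] := by simp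
    rw [hsrcs, PySem.Set.ofList_append_singleton, refIdx_append]
    simp only [List.nil_append]
    have hcnt : (grp init (srcOf it)).length = cntS init (srcOf it) := length_grp _ _
    by_cases hmem : srcOf it ∈ PySem.Set.ofList (init.map srcOf)
    · -- existing source: its group gains the new index in the middle of the flatMap
      rw [PySem.Set.add_of_mem hmem]
      obtain ⟨L1, L2, hsplit⟩ := List.append_of_mem hmem
      have hnd : (L1 ++ srcOf it :: L2).Nodup := by
        rw [← hsplit]; exact PySem.Set.nodup_ofList _
      have hs0L1 : srcOf it ∉ L1 := by
        have := List.disjoint_of_nodup_append hnd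
        exact fun hh => this hh List.mem_cons_self
      have hs0L2 : srcOf it ∉ L2 := (List.nodup_cons.mp hnd.of_append_right).1
      have hgrp' : ∀ s, s ≠ srcOf it →
          grp (init ++ [it]) s = grp init s := by
        intro s hs
        rw [grp_append]
        have : (srcOf it == s) = false := by
          simp only [beq_eq_false_iff_ne, ne_eq]
          exact fun h => hs h.symm
        simp [this]
      have hmap : ∀ L : List String, srcOf it ∉ L →
          L.flatMap (fun s => (grp (init ++ [it]) s).take (max ps 0).toNat)
          = L.flatMap (fun s => (grp init s).take (max ps 0).toNat) := by
        intro L hL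
        apply List.flatMap_congr
        intro s hsL
        rw [hgrp' s (fun h => hL (h ▸ hsL))]
      have hgrp0 : grp (init ++ [it]) (srcOf it) = grp init (srcOf it) ++ [(init.length : Int)] := by
        rw [grp_append]; simp
      have htake : (grp init (srcOf it) ++ [(init.length : Int)]).take (max ps 0).toNat
          = (grp init (srcOf it)).take (max ps 0).toNat
            ++ (if (cntS init (srcOf it) : Int) < ps then [(init.length : Int)] else []) := by
        rw [List.take_append, hcnt]
        by_cases hc : (cntS init (srcOf it) : Int) < ps
        · have h1 : cntS init (srcOf it) < (max ps 0).toNat := by omega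
          rw [if_pos hc]
          congr 1
          apply List.take_of_length_le
          simp; omega
        · have h1 : (max ps 0).toNat - cntS init (srcOf it) = 0 := by omega
          rw [if_neg hc, h1]
          simp
      rw [hsplit]
      simp only [List.flatMap_append, List.flatMap_cons]
      rw [hmap L1 hs0L1, hmap L2 hs0L2, hgrp0, htake]
      have hrearr : (L1.flatMap (fun s => (grp init s).take (max ps 0).toNat)
            ++ (((grp init (srcOf it)).take (max ps 0).toNat
                ++ (if (cntS init (srcOf it) : Int) < ps then [(init.length : Int)] else []))
              ++ L2.flatMap (fun s => (grp init s).take (max ps 0).toNat))).Perm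
          (((L1 ++ srcOf it :: L2).flatMap (fun s => (grp init s).take (max ps 0).toNat))
            ++ (if (cntS init (srcOf it) : Int) < ps then [(init.length : Int)] else [])) := by
        simp only [List.flatMap_append, List.flatMap_cons]
        rw [List.perm_iff_count]
        intro a
        simp [List.count_append]
        omega
      refine hrearr.trans ?_
      rw [← hsplit]
      exact ih.append_right _
    · -- fresh source: its singleton group is appended at the end
      rw [PySem.Set.add_of_not_mem hmem]
      have hnotin : srcOf it ∉ init.map srcOf := by
        intro h; exact hmem ((PySem.Set.mem_ofList _ _).mpr h)
      have hgrpnil : grp init (srcOf it) = [] := grp_of_not_mem _ _ hnotin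
      have hcnt0 : cntS init (srcOf it) = 0 := by rw [← length_grp, hgrpnil]; rfl
      have hmap : (PySem.Set.ofList (init.map srcOf)).flatMap
            (fun s => (grp (init ++ [it]) s).take (max ps 0).toNat)
          = (PySem.Set.ofList (init.map srcOf)).flatMap
            (fun s => (grp init s).take (max ps 0).toNat) := by
        apply List.flatMap_congr
        intro s hsL
        have hs : s ≠ srcOf it := by
          intro h; subst h; exact hmem hsL
        rw [grp_append]
        have : (srcOf it == s) = false := by
          simp only [beq_eq_false_iff_ne, ne_eq]
          exact fun h => hs h.symm
        simp [this]
      have hlast : (grp (init ++ [it]) (srcOf it)).take (max ps 0).toNat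
          = (if (cntS init (srcOf it) : Int) < ps then [(init.length : Int)] else []) := by
        rw [grp_append, hgrpnil]
        simp only [List.nil_append, beq_self_eq_true, if_true, hcnt0]
        by_cases hc : ((0 : Nat) : Int) < ps
        · rw [if_pos hc]
          apply List.take_of_length_le
          simp; omega
        · rw [if_neg hc]
          have : (max ps 0).toNat = 0 := by omega
          simp [this]
      rw [List.flatMap_append, List.flatMap_cons, List.flatMap_nil, List.append_nil,
        hmap, hlast, hcnt0]
      exact ih.append_right _

-- B's whole pipeline computes the total-capped prefix of A's per-source filter
lemma alt_eq_take (items : List (List (String × String))) (ps total : Int) (ht : 0 ≤ total) :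
    balance_items_by_source_alt items ps total
      = (filtB ps items PySem.Dict.empty).take total.toNat := by
  simp only [balance_items_by_source_alt]
  have hnodup : ((PySem.List.enumerate items).foldl
      (fun d p => d.modify (srcOf p.2) [] (fun v => v ++ [p.1])) PySem.Dict.empty).keys.Nodup := by
    apply PySem.Dict.nodup_keys_foldl_modify_key
    exact PySem.Dict.nodup_keys_empty
  rw [PySem.Dict.values_eq_map_keys _ hnodup [], by_src_keys]
  have hmapgrp : (PySem.Set.ofList (items.map srcOf)).map
        (fun k => ((PySem.List.enumerate items).foldl
          (fun d p => d.modify (srcOf p.2) [] (fun v => v ++ [p.1])) PySem.Dict.empty).getD k [])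
      = (PySem.Set.ofList (items.map srcOf)).map (fun k => grp items k) :=
    List.map_congr_left (fun k _ => by_src_getD items k)
  rw [hmapgrp, List.flatMap_map]
  have hslice : ∀ idxs : List Int, PySem.List.slice idxs none (some (max ps 0))
      = idxs.take (max ps 0).toNat :=
    fun idxs => PySem.List.slice_to idxs (le_max_right _ _)
  simp only [hslice]
  have hsorted : PySem.List.sorted
        ((PySem.Set.ofList (items.map srcOf)).flatMap (fun s => (grp items s).take (max ps 0).toNat))
        (fun x => x) false = refIdx ps [] items :=
    PySem.List.sorted_eq_of_perm_of_pairwise_lt _ _ _ (flat_perm_refIdx ps items).symm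
      (refIdx_pairwise ps items [])
  rw [hsorted, PySem.List.slice_to _ ht]
  have hinv0 : ∀ s, (PySem.Dict.empty : PySem.Dict String Int).getD s 0
      = min (cntS ([] : List (List (String × String))) s : Int) (max ps 0) := by
    intro s
    rw [PySem.Dict.getD_empty]
    simp [cntS]
  have hfiltB := filtB_eq_map_refIdx ps items [] PySem.Dict.empty hinv0
  simp only [List.nil_append] at hfiltB
  rw [hfiltB, List.map_take]

-- ===== VERDICT (by name: the statement is the Claim_ definition above) =====
theorem balance_items_by_source_spec : Claim_unchanged_balance_items_by_source := by
  intro items per_source total _ hpre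
  unfold Spec_balance_items_by_source
  intro hD
  unfold Pre_balance_items_by_source at hpre
  rw [alt_eq_take items per_source total hpre]
  unfold balance_items_by_source
  by_cases h1 : 1 ≤ total
  · rw [goA_eq_take per_source total items PySem.Dict.empty [] (by simpa using h1)]
    simp
  · have ht0 : total = 0 := by omega
    have hcases : items = [] ∨ per_source ≤ 0 := by
      unfold D_balance_items_by_source at hD
      by_cases hi : items = []
      · exact Or.inl hi
      · right; by_contra hp; exact hD ⟨hi, by omega, ht0⟩
    subst ht0
    rcases hcases with hi | hp
    · subst hi; simp [goA, filtB]
    · rw [goA_skip_all _ _ hp _ _ _ (fun k => by rw [PySem.Dict.getD_empty])]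
      simp

theorem balance_items_by_source_changed : Claim_changed_balance_items_by_source := by
  unfold Claim_changed_balance_items_by_source; decide

theorem balance_items_by_source_tight : Claim_exact_balance_items_by_source := by
  intro items per_source total _ _ hD
  obtain ⟨hne, hps, ht⟩ := hD
  obtain ⟨it, rest, rfl⟩ := List.exists_cons_of_ne_nil hne
  subst ht
  rw [alt_eq_take _ _ _ le_rfl]
  unfold balance_items_by_source
  have hcond : ¬ per_source ≤ (0 : Int) := by omega
  simp [goA, hcond]
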